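-- pv_equiv track=rewrite | github.com/P13LIAM/KU01-online-test | 06_woods/woods.py | posible_layer_num
-- ===== SOURCE A (Python) =====
-- def posible_layer_num(layer, L, max_num):
--     x = []
--     for num in layer:
--         for l in range(-L, L + 1):
--             new_num = num + l
--             if (new_num >= 1) and (new_num <= max_num):
--                 if len(x) == 0:
--                     x.append(new_num)
--                 elif x[-1] < new_num:
--                     x.append(new_num)
--     return x
-- ===== SOURCE B (Python) =====
-- def posible_layer_num(layer, L, max_num):
--     x = []
--     last = 0  # all appended values are >= 1, so 0 acts as "empty"
--     for num in layer:
--         lo = max(1, num - L, last + 1)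
--         hi = min(max_num, num + L)
--         if lo <= hi:
--             x.extend(range(lo, hi + 1))
--             last = hi
--     return x
-- ===== Notes on version B (the rewrite author's own statement) =====
-- stated objective: faster
-- what changed: A scans every offset in range(-L, L+1) for each element, appending one number at a time; B computes the contiguous valid block [max(1, num-L, last+1), min(max_num, num+L)] per element in O(1) and extends the result with it directly, tracking the last appended value.
import Mathlib
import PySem

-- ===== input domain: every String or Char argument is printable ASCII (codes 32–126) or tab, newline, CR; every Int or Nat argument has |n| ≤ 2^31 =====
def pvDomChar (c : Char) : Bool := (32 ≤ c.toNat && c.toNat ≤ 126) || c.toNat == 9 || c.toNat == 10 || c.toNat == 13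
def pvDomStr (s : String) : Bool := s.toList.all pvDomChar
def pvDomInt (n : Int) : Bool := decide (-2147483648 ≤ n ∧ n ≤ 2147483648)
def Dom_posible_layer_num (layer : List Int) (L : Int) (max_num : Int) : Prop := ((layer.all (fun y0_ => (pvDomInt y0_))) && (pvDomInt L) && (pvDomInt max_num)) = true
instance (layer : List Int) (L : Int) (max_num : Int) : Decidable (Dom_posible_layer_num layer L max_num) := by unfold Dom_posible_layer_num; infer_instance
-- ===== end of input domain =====

-- B replaces A's per-element scan of the whole window range(-L, L+1) by a direct jump to the
-- contiguous block [max(1, num-L, last+1), min(max_num, num+L)] that A would append for that element.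

-- ===== PORT A =====
-- one iteration of A's inner loop body (x[-1] via pyGet?; it sits behind the len(x)==0 check, so getD 0 never supplies the default)
def pvInnerStep (max_num : Int) (x : List Int) (new_num : Int) : List Int :=
  if new_num ≥ 1 ∧ new_num ≤ max_num then
    if x.length = 0 then x ++ [new_num]
    else if (PySem.List.pyGet? x (-1)).getD 0 < new_num then x ++ [new_num]
    else x
  else x

def posible_layer_num (layer : List Int) (L : Int) (max_num : Int) : List Int :=
  layer.foldl
    (fun x num => (PySem.List.pyRange (-L) (L + 1) 1).foldl
      (fun y l => pvInnerStep max_num y (num + l)) x) []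

-- ===== PORT B =====
def pvAltStep (L max_num : Int) (s : List Int × Int) (num : Int) : List Int × Int :=
  let lo := max 1 (max (num - L) (s.2 + 1))
  let hi := min max_num (num + L)
  if lo ≤ hi then (s.1 ++ PySem.List.pyRange lo (hi + 1) 1, hi) else s

def posible_layer_num_alt (layer : List Int) (L : Int) (max_num : Int) : List Int :=
  (layer.foldl (pvAltStep L max_num) ([], 0)).1

-- ===== PRECONDITION & SPEC =====
def Spec_posible_layer_num (layer : List Int) (L : Int) (max_num : Int) (out : List Int) : Prop := out = posible_layer_num_alt layer L max_num
instance (layer : List Int) (L : Int) (max_num : Int) (out : List Int) : Decidable (Spec_posible_layer_num layer L max_num out) := by unfold Spec_posible_layer_num; infer_instance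

-- ===== CLAIM (what is proved, stated in full; the proofs are below) =====
def Claim_equal_posible_layer_num : Prop := ∀ (layer : List Int) (L : Int) (max_num : Int), Dom_posible_layer_num layer L max_num → Spec_posible_layer_num layer L max_num (posible_layer_num layer L max_num)

-- ===== LEMMAS AND PROOFS =====

lemma pvRangeNil (a b : Int) (h : b ≤ a) : PySem.List.pyRange a b 1 = [] := by
  rw [PySem.List.pyRange_one]
  have : (b - a).toNat = 0 := by omega
  simp [this]

lemma pvGetNeg1 (x : List Int) (h : x ≠ []) :
    (PySem.List.pyGet? x (-1)).getD 0 = x.getLast?.getD 0 := by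
  have h1 : 1 ≤ x.length := List.length_pos_of_ne_nil h
  simp [PySem.List.pyGet?, PySem.List.pyIdx?, h1, List.getLast?_eq_getElem?]

lemma pvRangeLast (lo hi : Int) (h : lo ≤ hi) :
    (PySem.List.pyRange lo (hi + 1) 1).getLast? = some hi := by
  rw [PySem.List.pyRange_one]
  have hn : (hi + 1 - lo).toNat = (hi - lo).toNat + 1 := by omega
  rw [hn, List.range_succ]
  simp
  omega

-- A's inner loop over range(s, e) appends exactly the contiguous block B jumps to
lemma pvInnerFold (max_num num : Int) : ∀ (n : Nat) (s e : Int), (e - s).toNat = n →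
    ∀ (x : List Int), 0 ≤ x.getLast?.getD 0 →
    (PySem.List.pyRange s e 1).foldl (fun y l => pvInnerStep max_num y (num + l)) x =
      (if max 1 (max (num + s) (x.getLast?.getD 0 + 1)) ≤ min max_num (num + e - 1)
       then x ++ PySem.List.pyRange (max 1 (max (num + s) (x.getLast?.getD 0 + 1)))
              (min max_num (num + e - 1) + 1) 1
       else x) := by
  intro n
  induction n with
  | zero =>
    intro s e h x hx
    rw [pvRangeNil s e (by omega), List.foldl_nil, if_neg (by omega)]
  | succ n ih =>
    intro s e h x hx
    rw [PySem.List.pyRange_one_cons (by omega : s < e), List.foldl_cons]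
    set t := x.getLast?.getD 0 with ht
    by_cases hv : num + s ≥ 1 ∧ num + s ≤ max_num
    · -- the candidate num + s is in [1, max_num]
      by_cases happ : t < num + s
      · -- appended
        have hstep : pvInnerStep max_num x (num + s) = x ++ [num + s] := by
          unfold pvInnerStep
          by_cases hxe : x = []
          · simp [hxe, hv]
          · rw [if_pos hv, if_neg (by simp [List.length_eq_zero_iff]; exact hxe),
              pvGetNeg1 x hxe, ← ht, if_pos happ]
        rw [hstep]
        have hlast : ((x ++ [num + s]).getLast?.getD 0) = num + s := by
          simp
        rw [ih (s+1) e (by omega) (x ++ [num + s]) (by rw [hlast]; omega)]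
        rw [hlast]
        have hlo' : max 1 (max (num + (s+1)) ((num + s) + 1)) = num + s + 1 := by omega
        have hlo : max 1 (max (num + s) (t + 1)) = num + s := by omega
        rw [hlo', hlo]
        have hhi : num + s ≤ min max_num (num + e - 1) := by omega
        rw [if_pos hhi]
        rw [PySem.List.pyRange_one_cons (by omega : num + s < min max_num (num + e - 1) + 1)]
        by_cases hc : num + s + 1 ≤ min max_num (num + e - 1)
        · rw [if_pos hc]; simp
        · have hnil := pvRangeNil (num + s + 1) (min max_num (num + e - 1) + 1) (by omega)
          rw [hnil, if_neg hc]
      · -- in range but not greater than the last element, so x is nonempty and unchanged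
        have hne : x ≠ [] := by
          intro hc; rw [hc] at ht; simp at ht; omega
        have hstep : pvInnerStep max_num x (num + s) = x := by
          unfold pvInnerStep
          rw [if_pos hv, if_neg (by simp [List.length_eq_zero_iff]; exact hne),
            pvGetNeg1 x hne, ← ht, if_neg happ]
        rw [hstep, ih (s+1) e (by omega) x hx, ← ht]
        have : max 1 (max (num + (s+1)) (t + 1)) = max 1 (max (num + s) (t + 1)) := by omega
        rw [this]
    · -- out of [1, max_num]
      have hstep : pvInnerStep max_num x (num + s) = x := by
        unfold pvInnerStep; rw [if_neg hv]
      rw [hstep, ih (s+1) e (by omega) x hx, ← ht]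
      by_cases hlow : num + s < 1
      · have : max 1 (max (num + (s+1)) (t + 1)) = max 1 (max (num + s) (t + 1)) := by omega
        rw [this]
      · -- num + s > max_num: both blocks are empty
        rw [if_neg (by omega), if_neg (by omega)]

-- outer loop: B's carried 'last' equals the last element of the accumulator (0 when empty)
lemma pvOuter (L max_num : Int) : ∀ (layer x : List Int) (t : Int),
    t = x.getLast?.getD 0 → 0 ≤ t →
    layer.foldl
      (fun x num => (PySem.List.pyRange (-L) (L + 1) 1).foldl
        (fun y l => pvInnerStep max_num y (num + l)) x) x
    = (layer.foldl (pvAltStep L max_num) (x, t)).1 := by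
  intro layer
  induction layer with
  | nil => intro x t ht hx; rfl
  | cons num rest ih =>
    intro x t ht hx
    simp only [List.foldl_cons]
    rw [pvInnerFold max_num num ((L + 1 - -L).toNat) (-L) (L + 1) rfl x (by omega)]
    have e1 : num + -L = num - L := by ring
    have e2 : num + (L + 1) - 1 = num + L := by ring
    rw [e1, e2, ← ht]
    show _ = (List.foldl (pvAltStep L max_num) (pvAltStep L max_num (x, t) num) rest).1
    unfold pvAltStep
    simp only []
    by_cases hcond : max 1 (max (num - L) (t + 1)) ≤ min max_num (num + L)
    · rw [if_pos hcond, if_pos hcond]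
      apply ih
      · rw [List.getLast?_append]
        rw [pvRangeLast _ _ (by omega)]
        rfl
      · omega
    · rw [if_neg hcond, if_neg hcond]
      exact ih x t ht hx

-- ===== VERDICT (by name: the statement is the Claim_ definition above) =====
theorem posible_layer_num_spec : Claim_equal_posible_layer_num := by
  intro layer L max_num _
  unfold Spec_posible_layer_num posible_layer_num posible_layer_num_alt
  exact pvOuter L max_num layer [] 0 rfl le_rfl
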